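-- pv_equiv track=rewrite | github.com/superchinois/api-gateway | app/utils/query_utils.py | build_query_cash
-- ===== SOURCE A (Python) =====
-- def build_query_cash(itemcodes, year, months):
--     sql_params_oinv={
--     'fields':["t0.docdate","t1.itemcode","sum(t1.quantity) as quantity","sum(t1.linetotal) as linetotal", "t1.targettype"],
--     'tables':"dbo.inv1 t1",
--     'where':["t1.itemcode in ({itemcodes})"],
--     'join':{"dbo.oinv t0":('1',["t0.docentry=t1.docentry","year(t0.docdate)='{year}'","month(t0.docdate) in {months}"]),
--              "ocrd _ocrd":('2', ["_ocrd.cardcode=t0.cardcode","(_ocrd.qrygroup1='Y' or _ocrd.qrygroup18='Y')"])},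
--     'groupby':"t0.docdate, t1.itemcode ,t1.targettype",
--     }
--     sql_params_orin={
--     'fields':["t0.docdate","t1.itemcode","-sum(t1.quantity) as quantity","-sum(t1.linetotal) as linetotal", "t1.targettype"],
--     'tables':"dbo.rin1 t1",
--     'where':["t1.itemcode in ({itemcodes})"],
--     'join':{"dbo.orin t0":('1',["t0.docentry=t1.docentry","year(t0.docdate)='{year}'","month(t0.docdate) in {months}"]),
--              "ocrd _ocrd":('2', ["_ocrd.cardcode=t0.cardcode","(_ocrd.qrygroup1='Y' or _ocrd.qrygroup18='Y')"])},
--     'groupby':"t0.docdate, t1.itemcode ,t1.targettype",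
--     }
--     months_string="("+",".join(["'{}'".format(str(m)) for m in months])+")"
--     stmt1=querybuilder(sql_params_oinv).format_map({'itemcodes':itemcodes, 'year':year,'months':months_string})
--     stmt2=querybuilder(sql_params_orin).format_map({'itemcodes':itemcodes, 'year':year,'months':months_string})
--     return " union all ".join([stmt1, stmt2])
--
-- def querybuilder(params):
--     keys=['fields', 'tables', 'join','leftjoin', 'where', 'groupby','orderby']
--     keywords={'fields':'{}','tables':'from {}', 'join':'join {} on {}', 'where':'where {}',
--     'groupby':'group by {}', 'orderby':'order by {}', 'leftjoin':"left join {} on {}"}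
--     query_tpl="select"
--     for k in keys:
--         if k in params:
--             if k=='join' or k=='leftjoin' :
--                 for t in sorted(params[k], key=params[k].__getitem__):
--                     on=" and ".join(params[k][t][1])
--                     table=t
--                     query_tpl = " ".join([query_tpl, keywords[k].format(table,on)])
--             elif k=='where':
--                 where=" and ".join(params[k])
--                 query_tpl=" ".join([query_tpl, keywords[k].format(where)])
--             elif k=='fields':
--                 fields=",".join(params[k])
--                 query_tpl=" ".join([query_tpl, fields])
--             else:
--                 query_tpl=" ".join([query_tpl, keywords[k].format(params[k])])
--     return query_tpl
-- ===== SOURCE B (Python) =====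
-- def build_query_cash(itemcodes, year, months):
--     months_string = "(" + ",".join("'" + str(m) + "'" for m in months) + ")"
--
--     def stmt(sign, line_table, head_table):
--         return ("select t0.docdate,t1.itemcode," + sign + "sum(t1.quantity) as quantity,"
--                 + sign + "sum(t1.linetotal) as linetotal,t1.targettype"
--                 + " from dbo." + line_table + " t1"
--                 + " join dbo." + head_table + " t0 on t0.docentry=t1.docentry"
--                 + " and year(t0.docdate)='" + year + "'"
--                 + " and month(t0.docdate) in " + months_string
--                 + " join ocrd _ocrd on _ocrd.cardcode=t0.cardcode"
--                 + " and (_ocrd.qrygroup1='Y' or _ocrd.qrygroup18='Y')"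
--                 + " where t1.itemcode in (" + itemcodes + ")"
--                 + " group by t0.docdate, t1.itemcode ,t1.targettype")
--
--     return stmt("", "inv1", "oinv") + " union all " + stmt("-", "rin1", "orin")
-- ===== Notes on version B (the rewrite author's own statement) =====
-- stated objective: simpler
-- what changed: B drops A's generic querybuilder dispatcher (keyword table, key loop, priority-sorted join dict, format_map templating) and instead emits each UNION branch as one fixed SELECT string by direct concatenation, the two branches differing only in the sign prefix and the inv1/oinv vs rin1/orin table names.
import Mathlib
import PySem

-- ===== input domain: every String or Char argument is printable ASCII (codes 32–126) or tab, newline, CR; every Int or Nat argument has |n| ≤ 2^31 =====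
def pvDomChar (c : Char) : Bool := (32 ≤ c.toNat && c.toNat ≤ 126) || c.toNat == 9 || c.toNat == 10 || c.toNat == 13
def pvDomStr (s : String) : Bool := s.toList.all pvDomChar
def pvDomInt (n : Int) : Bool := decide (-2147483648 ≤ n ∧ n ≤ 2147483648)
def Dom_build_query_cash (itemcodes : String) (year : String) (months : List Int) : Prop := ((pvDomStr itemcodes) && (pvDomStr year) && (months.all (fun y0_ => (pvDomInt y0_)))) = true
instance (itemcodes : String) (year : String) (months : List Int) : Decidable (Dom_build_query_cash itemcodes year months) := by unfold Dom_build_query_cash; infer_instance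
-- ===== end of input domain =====

-- B rebuilds each UNION branch by direct string concatenation from one fixed SELECT shape
-- (simpler decomposition); A drives a generic querybuilder dispatcher plus format_map. Return values proved equal.

-- ===== PORT A =====

-- A param value is a string, a list of strings, or a join-dict (as in A's heterogeneous dicts).
inductive PVal
  | s : String → PVal
  | ls : List String → PVal
  | jd : PySem.Dict String (String × List String) → PVal
deriving Repr, DecidableEq

-- str.format with positional '{}' fields (hand port; exact for templates without '{'/'}' escapes,
-- which is all querybuilder's keywords contain).
def fmtPos : List Char → List String → List Char
  | '{' :: '}' :: rest, a :: args => a.toList ++ fmtPos rest args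
  | c :: rest, args => c :: fmtPos rest args
  | [], _ => []

-- str.format_map (hand port; exact for templates whose '{name}' fields all occur in the map and
-- which contain no '{{'/'}}' escapes — true of every template A builds; inserted values are not rescanned, as in Python).
def fmtMap (cs : List Char) (m : PySem.Dict String String) : List Char :=
  match cs with
  | [] => []
  | c :: rest =>
    if c = '{' then
      let key := rest.takeWhile (· ≠ '}')
      let rest' := (rest.dropWhile (· ≠ '}')).drop 1
      (m.getD (String.ofList key) "").toList ++ fmtMap rest' m
    else c :: fmtMap rest m
termination_by cs.length
decreasing_by
  · have := List.length_dropWhile_le (fun c => decide (c ≠ '}')) rest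
    simp only [List.length_drop, List.length_cons]; omega
  · simp

-- sorted(params[k], key=params[k].__getitem__): the key is the tuple value of the join-dict;
-- ported by its first component — exact here since A only calls it with priorities '1' ≠ '2'
-- (Python would compare the second components only on a tie of the first).
def querybuilder (params : PySem.Dict String PVal) : String :=
  let keywords : PySem.Dict String String := PySem.Dict.ofList
    [("fields", "{}"), ("tables", "from {}"), ("join", "join {} on {}"), ("where", "where {}"),
     ("groupby", "group by {}"), ("orderby", "order by {}"), ("leftjoin", "left join {} on {}")]
  let keys := ["fields", "tables", "join", "leftjoin", "where", "groupby", "orderby"]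
  keys.foldl (fun query_tpl k =>
    if params.contains k then
      if k == "join" || k == "leftjoin" then
        match params.getD k (.s "") with
        | .jd d =>
          (PySem.List.sorted d.keys (fun t => (d.getD t ("", [])).1.toList) false).foldl (fun q t =>
            let on := PySem.Str.join " and " (d.getD t ("", [])).2
            let table := t
            PySem.Str.join " " [q, String.ofList (fmtPos (keywords.getD k "").toList [table, on])]) query_tpl
        | _ => query_tpl
      else if k == "where" then
        match params.getD k (.s "") with
        | .ls l =>
          let where_ := PySem.Str.join " and " l
          PySem.Str.join " " [query_tpl, String.ofList (fmtPos (keywords.getD k "").toList [where_])]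
        | _ => query_tpl
      else if k == "fields" then
        match params.getD k (.s "") with
        | .ls l => PySem.Str.join " " [query_tpl, PySem.Str.join "," l]
        | _ => query_tpl
      else
        match params.getD k (.s "") with
        | .s v => PySem.Str.join " " [query_tpl, String.ofList (fmtPos (keywords.getD k "").toList [v])]
        | _ => query_tpl
    else query_tpl) "select"

def sql_params_oinv : PySem.Dict String PVal := PySem.Dict.ofList
  [("fields", .ls ["t0.docdate", "t1.itemcode", "sum(t1.quantity) as quantity", "sum(t1.linetotal) as linetotal", "t1.targettype"]),
   ("tables", .s "dbo.inv1 t1"),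
   ("where", .ls ["t1.itemcode in ({itemcodes})"]),
   ("join", .jd (PySem.Dict.ofList
     [("dbo.oinv t0", ("1", ["t0.docentry=t1.docentry", "year(t0.docdate)='{year}'", "month(t0.docdate) in {months}"])),
      ("ocrd _ocrd", ("2", ["_ocrd.cardcode=t0.cardcode", "(_ocrd.qrygroup1='Y' or _ocrd.qrygroup18='Y')"]))])),
   ("groupby", .s "t0.docdate, t1.itemcode ,t1.targettype")]

def sql_params_orin : PySem.Dict String PVal := PySem.Dict.ofList
  [("fields", .ls ["t0.docdate", "t1.itemcode", "-sum(t1.quantity) as quantity", "-sum(t1.linetotal) as linetotal", "t1.targettype"]),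
   ("tables", .s "dbo.rin1 t1"),
   ("where", .ls ["t1.itemcode in ({itemcodes})"]),
   ("join", .jd (PySem.Dict.ofList
     [("dbo.orin t0", ("1", ["t0.docentry=t1.docentry", "year(t0.docdate)='{year}'", "month(t0.docdate) in {months}"])),
      ("ocrd _ocrd", ("2", ["_ocrd.cardcode=t0.cardcode", "(_ocrd.qrygroup1='Y' or _ocrd.qrygroup18='Y')"]))])),
   ("groupby", .s "t0.docdate, t1.itemcode ,t1.targettype")]

def build_query_cash (itemcodes : String) (year : String) (months : List Int) : String :=
  -- "'{}'".format(str(m)) is "'" ++ str(m) ++ "'"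
  let months_string := "(" ++ PySem.Str.join "," (months.map (fun m => "'" ++ PySem.Int.toStr m ++ "'")) ++ ")"
  let fm := PySem.Dict.ofList [("itemcodes", itemcodes), ("year", year), ("months", months_string)]
  let stmt1 := String.ofList (fmtMap (querybuilder sql_params_oinv).toList fm)
  let stmt2 := String.ofList (fmtMap (querybuilder sql_params_orin).toList fm)
  PySem.Str.join " union all " [stmt1, stmt2]

-- ===== PORT B =====

def bqc_stmt (sign : String) (line_table : String) (head_table : String)
    (itemcodes : String) (year : String) (months_string : String) : String :=
  "select t0.docdate,t1.itemcode," ++ sign ++ "sum(t1.quantity) as quantity,"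
    ++ sign ++ "sum(t1.linetotal) as linetotal,t1.targettype"
    ++ " from dbo." ++ line_table ++ " t1"
    ++ " join dbo." ++ head_table ++ " t0 on t0.docentry=t1.docentry"
    ++ " and year(t0.docdate)='" ++ year ++ "'"
    ++ " and month(t0.docdate) in " ++ months_string
    ++ " join ocrd _ocrd on _ocrd.cardcode=t0.cardcode"
    ++ " and (_ocrd.qrygroup1='Y' or _ocrd.qrygroup18='Y')"
    ++ " where t1.itemcode in (" ++ itemcodes ++ ")"
    ++ " group by t0.docdate, t1.itemcode ,t1.targettype"

def build_query_cash_alt (itemcodes : String) (year : String) (months : List Int) : String :=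
  let months_string := "(" ++ PySem.Str.join "," (months.map (fun m => "'" ++ PySem.Int.toStr m ++ "'")) ++ ")"
  bqc_stmt "" "inv1" "oinv" itemcodes year months_string
    ++ " union all "
    ++ bqc_stmt "-" "rin1" "orin" itemcodes year months_string

-- ===== PRECONDITION & SPEC =====
def Spec_build_query_cash (itemcodes : String) (year : String) (months : List Int) (out : String) : Prop := out = build_query_cash_alt itemcodes year months
instance (itemcodes : String) (year : String) (months : List Int) (out : String) : Decidable (Spec_build_query_cash itemcodes year months out) := by unfold Spec_build_query_cash; infer_instance

-- ===== CLAIM (what is proved, stated in full; the proofs are below) =====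
def Claim_equal_build_query_cash : Prop := ∀ (itemcodes : String) (year : String) (months : List Int), Dom_build_query_cash itemcodes year months → Spec_build_query_cash itemcodes year months (build_query_cash itemcodes year months)

-- ===== LEMMAS AND PROOFS =====

set_option maxRecDepth 2000
set_option maxHeartbeats 4000000

lemma fmtMap_nil (m : PySem.Dict String String) : fmtMap [] m = [] := by
  rw [fmtMap]

lemma fmtMap_cons_ne (c : Char) (rest : List Char) (m : PySem.Dict String String)
    (h : c ≠ '{') : fmtMap (c :: rest) m = c :: fmtMap rest m := by
  rw [fmtMap]; simp [h]

lemma fmtMap_nobrace (seg : List Char) (rest : List Char) (m : PySem.Dict String String)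
    (h : seg.all (fun c => c != '{') = true) : fmtMap (seg ++ rest) m = seg ++ fmtMap rest m := by
  induction seg with
  | nil => simp
  | cons c t ih =>
    have hc : c ≠ '{' := by
      have := (List.all_eq_true.mp h) c (by simp)
      simpa using this
    rw [List.cons_append, fmtMap_cons_ne c _ m hc]
    simp only [List.cons_append, List.cons.injEq, true_and]
    exact ih (List.all_eq_true.mpr (fun x hx => (List.all_eq_true.mp h) x (by simp [hx])))

lemma takeWhile_key (key : List Char) (rest : List Char) (h : key.all (fun c => c != '}') = true) :
    (key ++ '}' :: rest).takeWhile (fun x => !decide (x = '}')) = key := by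
  induction key with
  | nil => simp
  | cons c t ih =>
    have hc : c ≠ '}' := by
      have := (List.all_eq_true.mp h) c (by simp)
      simpa using this
    simp only [List.cons_append, List.takeWhile_cons, hc, decide_false, Bool.not_false, if_true]
    rw [ih (List.all_eq_true.mpr (fun x hx => (List.all_eq_true.mp h) x (by simp [hx])))]

lemma dropWhile_key (key : List Char) (rest : List Char) (h : key.all (fun c => c != '}') = true) :
    (key ++ '}' :: rest).dropWhile (fun x => !decide (x = '}')) = '}' :: rest := by
  induction key with
  | nil => simp
  | cons c t ih =>
    have hc : c ≠ '}' := by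
      have := (List.all_eq_true.mp h) c (by simp)
      simpa using this
    simp only [List.cons_append, List.dropWhile_cons, hc, decide_false, Bool.not_false, if_true]
    exact ih (List.all_eq_true.mpr (fun x hx => (List.all_eq_true.mp h) x (by simp [hx])))

lemma fmtMap_placeholder (key : List Char) (rest : List Char) (m : PySem.Dict String String)
    (h : key.all (fun c => c != '}') = true) :
    fmtMap ('{' :: (key ++ '}' :: rest)) m = (m.getD (String.ofList key) "").toList ++ fmtMap rest m := by
  rw [fmtMap]
  simp [takeWhile_key key rest h, dropWhile_key key rest h]

lemma fm_itemcodes (i y s : String) :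
    (PySem.Dict.ofList [("itemcodes", i), ("year", y), ("months", s)]).getD (String.ofList "itemcodes".toList) "" = i := by
  simp [PySem.Dict.ofList, PySem.Dict.getD, PySem.Dict.get?, PySem.Dict.update,
        PySem.Dict.insert, PySem.Dict.empty, PySem.Dict.contains]

lemma fm_year (i y s : String) :
    (PySem.Dict.ofList [("itemcodes", i), ("year", y), ("months", s)]).getD (String.ofList "year".toList) "" = y := by
  simp [PySem.Dict.ofList, PySem.Dict.getD, PySem.Dict.get?, PySem.Dict.update,
        PySem.Dict.insert, PySem.Dict.empty, PySem.Dict.contains, List.find?]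

lemma fm_months (i y s : String) :
    (PySem.Dict.ofList [("itemcodes", i), ("year", y), ("months", s)]).getD (String.ofList "months".toList) "" = s := by
  simp [PySem.Dict.ofList, PySem.Dict.getD, PySem.Dict.get?, PySem.Dict.update,
        PySem.Dict.insert, PySem.Dict.empty, PySem.Dict.contains, List.find?]

-- the generic shape: a template with the three placeholders in A's order
lemma fmtMap_three (c1 c2 c3 c4 : List Char) (i y s : String)
    (h1 : c1.all (fun c => c != '{') = true) (h2 : c2.all (fun c => c != '{') = true)
    (h3 : c3.all (fun c => c != '{') = true) (h4 : c4.all (fun c => c != '{') = true) :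
    fmtMap (c1 ++ '{' :: ("year".toList ++ '}' :: (c2 ++ '{' :: ("months".toList ++ '}' ::
      (c3 ++ '{' :: ("itemcodes".toList ++ '}' :: c4))))))
      (PySem.Dict.ofList [("itemcodes", i), ("year", y), ("months", s)])
    = c1 ++ y.toList ++ (c2 ++ s.toList ++ (c3 ++ i.toList ++ c4)) := by
  have h4' : fmtMap c4 (PySem.Dict.ofList [("itemcodes", i), ("year", y), ("months", s)]) = c4 := by
    have := fmtMap_nobrace c4 [] (PySem.Dict.ofList [("itemcodes", i), ("year", y), ("months", s)]) h4
    simpa [fmtMap_nil] using this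
  rw [fmtMap_nobrace _ _ _ h1, fmtMap_placeholder _ _ _ (by decide),
      fmtMap_nobrace _ _ _ h2, fmtMap_placeholder _ _ _ (by decide),
      fmtMap_nobrace _ _ _ h3, fmtMap_placeholder _ _ _ (by decide),
      h4']
  rw [fm_year, fm_months, fm_itemcodes]
  simp

lemma tpl_oinv : querybuilder sql_params_oinv =
    "select t0.docdate,t1.itemcode,sum(t1.quantity) as quantity,sum(t1.linetotal) as linetotal,t1.targettype from dbo.inv1 t1 join dbo.oinv t0 on t0.docentry=t1.docentry and year(t0.docdate)='{year}' and month(t0.docdate) in {months} join ocrd _ocrd on _ocrd.cardcode=t0.cardcode and (_ocrd.qrygroup1='Y' or _ocrd.qrygroup18='Y') where t1.itemcode in ({itemcodes}) group by t0.docdate, t1.itemcode ,t1.targettype" := by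
  decide

lemma tpl_orin : querybuilder sql_params_orin =
    "select t0.docdate,t1.itemcode,-sum(t1.quantity) as quantity,-sum(t1.linetotal) as linetotal,t1.targettype from dbo.rin1 t1 join dbo.orin t0 on t0.docentry=t1.docentry and year(t0.docdate)='{year}' and month(t0.docdate) in {months} join ocrd _ocrd on _ocrd.cardcode=t0.cardcode and (_ocrd.qrygroup1='Y' or _ocrd.qrygroup18='Y') where t1.itemcode in ({itemcodes}) group by t0.docdate, t1.itemcode ,t1.targettype" := by
  decide

lemma stmt_oinv (i y s : String) :
    fmtMap (querybuilder sql_params_oinv).toList (PySem.Dict.ofList [("itemcodes", i), ("year", y), ("months", s)])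
    = (bqc_stmt "" "inv1" "oinv" i y s).toList := by
  rw [tpl_oinv]
  have hd : ("select t0.docdate,t1.itemcode,sum(t1.quantity) as quantity,sum(t1.linetotal) as linetotal,t1.targettype from dbo.inv1 t1 join dbo.oinv t0 on t0.docentry=t1.docentry and year(t0.docdate)='{year}' and month(t0.docdate) in {months} join ocrd _ocrd on _ocrd.cardcode=t0.cardcode and (_ocrd.qrygroup1='Y' or _ocrd.qrygroup18='Y') where t1.itemcode in ({itemcodes}) group by t0.docdate, t1.itemcode ,t1.targettype" : String).toList
      = ("select t0.docdate,t1.itemcode,sum(t1.quantity) as quantity,sum(t1.linetotal) as linetotal,t1.targettype from dbo.inv1 t1 join dbo.oinv t0 on t0.docentry=t1.docentry and year(t0.docdate)='".toList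
        ++ '{' :: ("year".toList ++ '}' :: ("' and month(t0.docdate) in ".toList
        ++ '{' :: ("months".toList ++ '}' :: (" join ocrd _ocrd on _ocrd.cardcode=t0.cardcode and (_ocrd.qrygroup1='Y' or _ocrd.qrygroup18='Y') where t1.itemcode in (".toList
        ++ '{' :: ("itemcodes".toList ++ '}' :: ") group by t0.docdate, t1.itemcode ,t1.targettype".toList)))))) := by decide
  rw [hd, fmtMap_three _ _ _ _ i y s (by decide) (by decide) (by decide) (by decide)]
  simp [bqc_stmt]

lemma stmt_orin (i y s : String) :
    fmtMap (querybuilder sql_params_orin).toList (PySem.Dict.ofList [("itemcodes", i), ("year", y), ("months", s)])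
    = (bqc_stmt "-" "rin1" "orin" i y s).toList := by
  rw [tpl_orin]
  have hd : ("select t0.docdate,t1.itemcode,-sum(t1.quantity) as quantity,-sum(t1.linetotal) as linetotal,t1.targettype from dbo.rin1 t1 join dbo.orin t0 on t0.docentry=t1.docentry and year(t0.docdate)='{year}' and month(t0.docdate) in {months} join ocrd _ocrd on _ocrd.cardcode=t0.cardcode and (_ocrd.qrygroup1='Y' or _ocrd.qrygroup18='Y') where t1.itemcode in ({itemcodes}) group by t0.docdate, t1.itemcode ,t1.targettype" : String).toList
      = ("select t0.docdate,t1.itemcode,-sum(t1.quantity) as quantity,-sum(t1.linetotal) as linetotal,t1.targettype from dbo.rin1 t1 join dbo.orin t0 on t0.docentry=t1.docentry and year(t0.docdate)='".toList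
        ++ '{' :: ("year".toList ++ '}' :: ("' and month(t0.docdate) in ".toList
        ++ '{' :: ("months".toList ++ '}' :: (" join ocrd _ocrd on _ocrd.cardcode=t0.cardcode and (_ocrd.qrygroup1='Y' or _ocrd.qrygroup18='Y') where t1.itemcode in (".toList
        ++ '{' :: ("itemcodes".toList ++ '}' :: ") group by t0.docdate, t1.itemcode ,t1.targettype".toList)))))) := by decide
  rw [hd, fmtMap_three _ _ _ _ i y s (by decide) (by decide) (by decide) (by decide)]
  simp [bqc_stmt]

-- ===== VERDICT (by name: the statement is the Claim_ definition above) =====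
theorem build_query_cash_spec : Claim_equal_build_query_cash := by
  intro itemcodes year months _
  unfold Spec_build_query_cash build_query_cash build_query_cash_alt
  apply String.toList_inj.mp
  simp only [PySem.Str.join, PySem.Chars.join, List.map, List.intercalate]
  rw [stmt_oinv, stmt_orin]
  simp
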